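-- pv_equiv track=rewrite | github.com/jdellert/ccnc | code/ccnc/algorithm.py | compute_clustering_statistic
-- ===== SOURCE A (Python) =====
-- def compute_clustering_statistic(clusters):
--   # define cluster size weighting here (spelled out for easy modifiability)
--   #   hard-coded weights up to maximum cluster size 16, error will result from any larger cluster size
--   #   to use our clustering statistic in the unlikely case there are clusters with k > 16, expand by binom(k,2) values as needed
--   counts_of_cluster_size = [0,0,0,0,0,0,0,0,0,0,0,0,0,0,0,0,0]
--   size_weights = [0,0,1,3,6,10,15,21,28,36,45,55,66,78,91,105,120]
--   for cluster in clusters: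
--     counts_of_cluster_size[len(cluster)] += 1
--   clustering_statistic = 0;
--   for i in range(0,len(counts_of_cluster_size)):
--     clustering_statistic += counts_of_cluster_size[i] * size_weights[i]
--   return clustering_statistic
-- ===== SOURCE B (Python) =====
-- def compute_clustering_statistic(clusters):
--   # single accumulation loop over clusters; keeps size_weights indexing
--   # (so clusters larger than 16 still raise IndexError, as in the original)
--   size_weights = [0,0,1,3,6,10,15,21,28,36,45,55,66,78,91,105,120]
--   stat = 0
--   for cluster in clusters:
--     stat += size_weights[len(cluster)]
--   return stat
-- ===== Notes on version B (the rewrite author's own statement) =====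
-- stated objective: simpler
-- what changed: Dropped the 17-bucket cluster-size histogram and the second weighted reduction loop; B accumulates size_weights[len(cluster)] directly in one pass over clusters.
import Mathlib
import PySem

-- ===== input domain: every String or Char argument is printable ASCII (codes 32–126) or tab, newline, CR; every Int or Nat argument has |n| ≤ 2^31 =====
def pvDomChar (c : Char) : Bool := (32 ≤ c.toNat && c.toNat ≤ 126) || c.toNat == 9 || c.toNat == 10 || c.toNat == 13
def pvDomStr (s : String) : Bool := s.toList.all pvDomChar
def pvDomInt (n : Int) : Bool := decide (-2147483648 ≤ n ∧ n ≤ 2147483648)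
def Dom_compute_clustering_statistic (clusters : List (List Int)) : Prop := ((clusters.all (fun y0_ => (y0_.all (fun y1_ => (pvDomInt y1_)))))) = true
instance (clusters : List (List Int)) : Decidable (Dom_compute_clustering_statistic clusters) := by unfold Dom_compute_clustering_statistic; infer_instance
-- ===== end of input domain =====

-- B replaces A's cluster-size histogram + weighted reduction with one direct accumulation loop (objective: simpler).

-- ===== PORT A =====
def pvWeights : List Int := [0,0,1,3,6,10,15,21,28,36,45,55,66,78,91,105,120]

-- counts_of_cluster_size[len(cluster)] += 1 (in-range indexing under Pre_; getD/set are exact there)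
def pvIncr (c : List Int) (n : Nat) : List Int := c.set n (c.getD n 0 + 1)

-- the second loop: for i in range(0, len(counts)): stat += counts[i] * size_weights[i]
def pvReduce (counts : List Int) : Int :=
  (List.range counts.length).foldl (fun s i => s + counts.getD i 0 * pvWeights.getD i 0) 0

def compute_clustering_statistic (clusters : List (List Int)) : Int :=
  pvReduce (clusters.foldl (fun c cl => pvIncr c cl.length) (List.replicate 17 (0 : Int)))

-- ===== PORT B =====
def compute_clustering_statistic_alt (clusters : List (List Int)) : Int :=
  clusters.foldl (fun s cl => s + pvWeights.getD cl.length 0) 0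

-- ===== PRECONDITION & SPEC =====
-- A (and B) raise IndexError on any cluster of size > 16; Pre_ excludes exactly those inputs.
def Pre_compute_clustering_statistic (clusters : List (List Int)) : Prop :=
  ∀ cl ∈ clusters, cl.length ≤ 16
instance (clusters : List (List Int)) : Decidable (Pre_compute_clustering_statistic clusters) := by
  unfold Pre_compute_clustering_statistic; infer_instance

def pvWitness_compute_clustering_statistic : List (List Int) := [[1, 2], [3], [4, 5, 6]]

def Spec_compute_clustering_statistic (clusters : List (List Int)) (out : Int) : Prop := out = compute_clustering_statistic_alt clusters
instance (clusters : List (List Int)) (out : Int) : Decidable (Spec_compute_clustering_statistic clusters out) := by unfold Spec_compute_clustering_statistic; infer_instance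

-- ===== CLAIM (what is proved, stated in full; the proofs are below) =====
def Claim_equal_compute_clustering_statistic : Prop := ∀ (clusters : List (List Int)), Dom_compute_clustering_statistic clusters → Pre_compute_clustering_statistic clusters → Spec_compute_clustering_statistic clusters (compute_clustering_statistic clusters)

-- ===== LEMMAS AND PROOFS =====

-- incrementing bucket n (n ≤ 16) of a 17-bucket histogram raises the weighted total by pvWeights[n]
theorem pvReduce_incr (c : List Int) (hc : c.length = 17) (n : Nat) (hn : n < 17) :
    pvReduce (pvIncr c n) = pvReduce c + pvWeights.getD n 0 := by
  match c, hc with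
  | [a0,a1,a2,a3,a4,a5,a6,a7,a8,a9,a10,a11,a12,a13,a14,a15,a16], _ =>
    interval_cases n <;> simp [pvReduce, pvIncr, pvWeights, List.range_succ] <;> ring

theorem pvLoop (rest : List (List Int)) (c : List Int) (hc : c.length = 17)
    (hpre : ∀ cl ∈ rest, cl.length ≤ 16) :
    pvReduce (rest.foldl (fun c cl => pvIncr c cl.length) c)
      = rest.foldl (fun s cl => s + pvWeights.getD cl.length 0) (pvReduce c) := by
  induction rest generalizing c with
  | nil => rfl
  | cons cl rest ih =>
    have hlen : (pvIncr c cl.length).length = 17 := by simp [pvIncr, hc]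
    have hn : cl.length < 17 := by
      have := hpre cl (by simp); omega
    simp only [List.foldl_cons]
    rw [ih _ hlen (fun x hx => hpre x (by simp [hx])), pvReduce_incr c hc cl.length hn]

-- ===== VERDICT (by name: the statement is the Claim_ definition above) =====
theorem compute_clustering_statistic_spec : Claim_equal_compute_clustering_statistic := by
  intro clusters _ hpre
  unfold Spec_compute_clustering_statistic compute_clustering_statistic compute_clustering_statistic_alt
  rw [pvLoop clusters (List.replicate 17 0) (by simp) hpre]
  norm_num [pvReduce]
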